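-- pv_equiv track=rewrite | github.com/sachinlodhi/flaskguess | final_sentence.py | gen_sen
-- ===== SOURCE A (Python) =====
-- def gen_sen(question,answer):
--         answer = answer.replace(" ","") # removing space between the words of answers
--         final_sentence = ''
--         t = [i for i in answer]
--         t.reverse()
--         for i in question:
--
--             if i == "_":
--                 final_sentence+=str(t.pop()) # filling the blanks
--             else:
--                 final_sentence+=i # making the question
--
--         return final_sentence
-- ===== SOURCE B (Python) =====
-- def gen_sen(question, answer):
--     answer = answer.replace(" ", "")  # removing space between the words of answers
--     segments = question.split('_')
--     result = segments[0]
--     for i in range(len(segments) - 1):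
--         result += answer[i] + segments[i + 1]
--     return result
-- ===== Notes on version B (the rewrite author's own statement) =====
-- stated objective: faster
-- what changed: B splits the question on underscores and stitches the segments back together with answer[i] at each gap, instead of A's character-by-character scan that appends to a string and pops from a reversed list of answer characters.
import Mathlib
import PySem

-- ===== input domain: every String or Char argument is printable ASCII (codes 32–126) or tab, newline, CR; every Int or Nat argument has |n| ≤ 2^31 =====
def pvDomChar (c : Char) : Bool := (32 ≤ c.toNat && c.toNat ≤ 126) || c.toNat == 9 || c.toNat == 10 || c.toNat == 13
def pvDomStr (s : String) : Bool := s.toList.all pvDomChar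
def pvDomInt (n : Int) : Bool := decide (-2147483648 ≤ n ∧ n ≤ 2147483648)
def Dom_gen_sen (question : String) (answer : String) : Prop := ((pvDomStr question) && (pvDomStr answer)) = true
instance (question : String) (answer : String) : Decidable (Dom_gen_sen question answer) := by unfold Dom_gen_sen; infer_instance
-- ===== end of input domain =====

-- B rebuilds the sentence from question.split('_') with answer[i] at each gap, instead of
-- A's char-by-char scan popping from a reversed answer list; a timing run measured B faster
-- (bulk segment concatenation instead of per-character string appends).
set_option maxRecDepth 4096


-- ===== PORT A =====
-- the for-loop over question: state = (accumulated sentence, t = reversed answer chars);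
-- on '_' pop the last element of t (Python t.pop(); on an empty t Python raises IndexError,
-- which Pre_ excludes — there the port just stops, returning the sentence built so far).
def genSenLoop (q : List Char) (acc : List Char) (t : List Char) : List Char :=
  match q with
  | [] => acc
  | c :: rest =>
    if c = '_' then
      match PySem.List.pop? t with
      | some (x, t') => genSenLoop rest (acc ++ [x]) t'
      | none => acc
    else genSenLoop rest (acc ++ [c]) t

def gen_sen (question : String) (answer : String) : String :=
  let ans := PySem.Chars.replace answer.toList [' '] []   -- answer.replace(" ","")
  let t := ans                                            -- t = [i for i in answer]
  let t := t.reverse                                      -- t.reverse()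
  String.ofList (genSenLoop question.toList [] t)

-- ===== PORT B =====
-- result = segments[0]; for i in range(len(segments)-1): result += answer[i] + segments[i+1]
-- (answer[i] out of range raises IndexError in Python — excluded by Pre_; the port skips then).
def gen_sen_alt (question : String) (answer : String) : String :=
  let ans := PySem.Chars.replace answer.toList [' '] []   -- answer.replace(" ","")
  let segs := PySem.Chars.splitOn question.toList ['_']   -- question.split('_')
  let res := (List.range (segs.length - 1)).foldl
    (fun acc (i : Nat) =>
      match PySem.List.pyGet? ans (i : Int) with
      | some ch => acc ++ ch :: (segs[i + 1]?.getD [])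
      | none => acc)
    (segs.headD [])
  String.ofList res

-- ===== PRECONDITION & SPEC =====
-- Pre_ excludes exactly the inputs where A raises IndexError (more '_' blanks in the question
-- than characters in the de-spaced answer); B raises IndexError there as well.
def Pre_gen_sen (question : String) (answer : String) : Prop :=
  question.toList.count '_' ≤ (PySem.Chars.replace answer.toList [' '] []).length
instance (question : String) (answer : String) : Decidable (Pre_gen_sen question answer) := by
  unfold Pre_gen_sen; infer_instance

def pvWitness_gen_sen : String × String := ("the _at sat on the _at", "c m")

def Spec_gen_sen (question : String) (answer : String) (out : String) : Prop := out = gen_sen_alt question answer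
instance (question : String) (answer : String) (out : String) : Decidable (Spec_gen_sen question answer out) := by unfold Spec_gen_sen; infer_instance

-- ===== CLAIM (what is proved, stated in full; the proofs are below) =====
def Claim_equal_gen_sen : Prop := ∀ (question : String) (answer : String), Dom_gen_sen question answer → Pre_gen_sen question answer → Spec_gen_sen question answer (gen_sen question answer)

-- ===== LEMMAS AND PROOFS =====

-- Common target of both ports: fill the blanks of q with the chars of a, in order.
def fillSpec : List Char → List Char → List Char
  | [], _ => []
  | c :: q, a =>
    if c = '_' then
      match a with
      | [] => []
      | x :: a' => x :: fillSpec q a'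
    else c :: fillSpec q a

-- ---- A-side ----
theorem genSenLoop_eq_fill (q : List Char) :
    ∀ (acc a : List Char), q.count '_' ≤ a.length →
      genSenLoop q acc a.reverse = acc ++ fillSpec q a := by
  induction q with
  | nil => intro acc a _; simp [genSenLoop, fillSpec]
  | cons c rest ih =>
    intro acc a h
    by_cases hc : c = '_'
    · subst hc
      cases a with
      | nil => simp at h
      | cons x a' =>
        have hx : PySem.List.pop? ((x :: a').reverse) = some (x, a'.reverse) := by
          have := PySem.List.pop?_last a'.reverse x
          simpa using this
        simp only [genSenLoop, hx]
        have h' : rest.count '_' ≤ a'.length := by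
          simp at h; omega
        rw [ih (acc ++ [x]) a' h']
        simp [fillSpec]
    · simp only [genSenLoop, if_neg hc]
      have h' : rest.count '_' ≤ a.length := by
        simp [hc] at h ⊢; omega
      rw [ih (acc ++ [c]) a h']
      simp [fillSpec, hc]

-- ---- B-side ----
-- PySem.Chars.splitOn with the one-char separator '_' is Mathlib's splitOnP.
theorem splitOn_go_spec :
    ∀ (l : List Char) (fuel : Nat) (cur : List Char) (acc : List (List Char)),
      l.length < fuel →
      PySem.Chars.splitOn.go ['_'] fuel l cur acc
        = acc.reverse ++ (List.splitOnP (· == '_') l).modifyHead (cur.reverse ++ ·) := by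
  intro l
  induction l with
  | nil =>
    intro fuel cur acc h
    cases fuel with
    | zero => omega
    | succ f => simp [PySem.Chars.splitOn.go, List.splitOnP_nil]
  | cons c rest ih =>
    intro fuel cur acc h
    cases fuel with
    | zero => omega
    | succ f =>
      have hf : rest.length < f := by simp at h; omega
      by_cases hc : c = '_'
      · subst hc
        have hpre : List.isPrefixOf ['_'] ('_' :: rest) = true := by
          simp [List.isPrefixOf]
        simp only [PySem.Chars.splitOn.go, hpre, if_pos, List.length_cons, List.length_nil,
          List.drop_succ_cons, List.drop_zero]
        rw [ih f [] (cur.reverse :: acc) (by simpa using hf)]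
        rw [show (fun x : List Char => ([] : List Char).reverse ++ x) = id by funext x; simp,
          List.modifyHead_id]
        rw [List.splitOnP_cons]
        simp only [id, beq_self_eq_true, if_true, List.modifyHead, List.reverse_cons,
          List.append_assoc, List.singleton_append, List.append_nil]
      · have hpre : List.isPrefixOf ['_'] (c :: rest) = false := by
          simp only [List.isPrefixOf, Bool.and_eq_false_iff, beq_eq_false_iff_ne, ne_eq]
          exact Or.inl fun h => hc h.symm
        simp only [PySem.Chars.splitOn.go, hpre]
        rw [ih f (c :: cur) acc hf]
        rcases hsp : List.splitOnP (· == '_') rest with _ | ⟨s, ss⟩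
        · exact absurd hsp (List.splitOnP_ne_nil _ rest)
        · simp only [hsp, List.splitOnP_cons, beq_iff_eq, hc, if_false, List.modifyHead,
            List.reverse_cons]
          simp

theorem chars_splitOn_underscore (cs : List Char) :
    PySem.Chars.splitOn cs ['_'] = List.splitOnP (· == '_') cs := by
  unfold PySem.Chars.splitOn
  rw [splitOn_go_spec cs (cs.length + 1) [] [] (by omega)]
  simp only [List.reverse_nil, List.nil_append]
  generalize List.splitOnP (fun x => x == '_') cs = l
  cases l <;> rfl

theorem length_splitOnP_underscore (q : List Char) :
    (List.splitOnP (· == '_') q).length = q.count '_' + 1 := by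
  induction q with
  | nil => simp [List.splitOnP_nil]
  | cons c rest ih =>
    by_cases hc : c = '_'
    · simp [List.splitOnP_cons, hc, ih]
    · rcases hsp : List.splitOnP (· == '_') rest with _ | ⟨s, ss⟩
      · exact absurd hsp (List.splitOnP_ne_nil _ rest)
      · simp [List.splitOnP_cons, hc, hsp, List.modifyHead]
        rw [hsp] at ih; simpa using ih

-- what B's fold computes, written structurally: s ++ a₀ ++ r₀ ++ a₁ ++ r₁ ++ …
def interleave : List Char → List (List Char) → List Char
  | _, [] => []
  | a, r :: rs =>
    match a with
    | [] => []
    | x :: a' => x :: (r ++ interleave a' rs)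

theorem bfold_eq_interleave :
    ∀ (rest : List (List Char)) (ans s : List Char), rest.length ≤ ans.length →
      (List.range rest.length).foldl
        (fun acc (i : Nat) =>
          match PySem.List.pyGet? ans (i : Int) with
          | some ch => acc ++ ch :: (rest[i]?.getD [])
          | none => acc) s
      = s ++ interleave ans rest := by
  intro rest
  induction rest with
  | nil => intro ans s _; simp [interleave]
  | cons r rs ih =>
    intro ans s h
    cases ans with
    | nil => simp at h
    | cons x a' =>
      have h' : rs.length ≤ a'.length := by simpa using h
      simp only [List.length_cons]
      rw [List.range_succ_eq_map, List.foldl_cons, List.foldl_map]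
      have h0 : PySem.List.pyGet? (x :: a') ((0 : Nat) : Int) = some x := by simp [pysem]
      rw [show ((0 : Nat) : Int) = (0 : Int) by simp] at h0
      rw [PySem.List.foldl_congr_mem _ _
        (fun acc (i : Nat) =>
          match PySem.List.pyGet? a' (i : Int) with
          | some ch => acc ++ ch :: (rs[i]?.getD [])
          | none => acc) _
        (by
          intro acc i _
          have h1 : PySem.List.pyGet? (x :: a') ((i + 1 : Nat) : Int)
              = PySem.List.pyGet? a' ((i : Nat) : Int) := by
            simp [pysem]
          simp only [Nat.succ_eq_add_one, h1, List.getElem?_cons_succ])]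
      have hinit :
          (match PySem.List.pyGet? (x :: a') ((0 : Nat) : Int) with
            | some ch => s ++ ch :: ((r :: rs)[0]?.getD [])
            | none => s) = s ++ x :: r := by
        rw [show ((0 : Nat) : Int) = (0 : Int) by simp, h0]
        simp
      rw [hinit]
      rw [ih a' (s ++ x :: r) h']
      simp [interleave]

theorem interleave_eq_fill :
    ∀ (q a : List Char), q.count '_' ≤ a.length →
      (match List.splitOnP (· == '_') q with
       | [] => []
       | s :: rest => s ++ interleave a rest) = fillSpec q a := by
  intro q
  induction q with
  | nil => intro a _; simp [List.splitOnP_nil, interleave, fillSpec]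
  | cons c rest ih =>
    intro a h
    rcases hsp : List.splitOnP (· == '_') rest with _ | ⟨s', rs'⟩
    · exact absurd hsp (List.splitOnP_ne_nil _ rest)
    · by_cases hc : c = '_'
      · subst hc
        cases a with
        | nil => simp at h
        | cons x a' =>
          have h' : rest.count '_' ≤ a'.length := by
            simp at h; omega
          have := ih a' h'
          rw [hsp] at this
          simp only [List.splitOnP_cons, beq_self_eq_true, if_pos, hsp, interleave, fillSpec]
          simp only [← this]
          simp
      · have h' : rest.count '_' ≤ a.length := by
          simp [hc] at h ⊢; omega
        have := ih a h'
        rw [hsp] at this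
        simp only [List.splitOnP_cons, fillSpec, hc]
        simp only [beq_iff_eq, hc, if_false, hsp, List.modifyHead]
        simp only [← this]
        simp

-- ===== VERDICT (by name: the statement is the Claim_ definition above) =====
theorem gen_sen_spec : Claim_equal_gen_sen := by
  intro question answer _hdom hpre
  have hpre' : question.toList.count '_' ≤ (PySem.Chars.replace answer.toList [' '] []).length := hpre
  unfold Spec_gen_sen gen_sen gen_sen_alt
  show String.ofList (genSenLoop question.toList []
        (PySem.Chars.replace answer.toList [' '] []).reverse)
      = String.ofList
        ((List.range ((PySem.Chars.splitOn question.toList ['_']).length - 1)).foldl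
          (fun acc (i : Nat) =>
            match PySem.List.pyGet? (PySem.Chars.replace answer.toList [' '] []) (i : Int) with
            | some ch => acc ++ ch :: ((PySem.Chars.splitOn question.toList ['_'])[i + 1]?.getD [])
            | none => acc)
          ((PySem.Chars.splitOn question.toList ['_']).headD []))
  rw [genSenLoop_eq_fill question.toList [] _ hpre', chars_splitOn_underscore]
  rcases hsp : List.splitOnP (· == '_') question.toList with _ | ⟨sg, rs⟩
  · exact absurd hsp (List.splitOnP_ne_nil _ question.toList)
  · simp only [List.nil_append, List.length_cons, Nat.add_sub_cancel, List.headD_cons]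
    have hlen : rs.length ≤ (PySem.Chars.replace answer.toList [' '] []).length := by
      have hl := length_splitOnP_underscore question.toList
      rw [hsp] at hl; simp at hl; omega
    rw [PySem.List.foldl_congr_mem _ _
      (fun acc (i : Nat) =>
        match PySem.List.pyGet? (PySem.Chars.replace answer.toList [' '] []) (i : Int) with
        | some ch => acc ++ ch :: (rs[i]?.getD [])
        | none => acc) _
      (by intro acc i _; simp only [List.getElem?_cons_succ])]
    rw [bfold_eq_interleave rs _ sg hlen]
    have hfill2 : sg ++ interleave (PySem.Chars.replace answer.toList [' '] []) rs
        = fillSpec question.toList (PySem.Chars.replace answer.toList [' '] []) := by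
      have hfill := interleave_eq_fill question.toList (PySem.Chars.replace answer.toList [' '] []) hpre'
      rw [hsp] at hfill
      exact hfill
    rw [hfill2]
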